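-- pv_equiv track=rewrite | github.com/lllexas/BlockingKing | CNN/Tests/analyze_vectors.py | bucket_by_size
-- ===== SOURCE A (Python) =====
-- def bucket_by_size(vectors, size_step=5):
--     """按 (H, W) 分桶统计"""
--     buckets = {}
--     for v in vectors:
--         h_bin = (v[4] - 1) // size_step * size_step + 1
--         w_bin = (v[5] - 1) // size_step * size_step + 1
--         key = (h_bin, w_bin)
--         if key not in buckets:
--             buckets[key] = []
--         buckets[key].append(v)
--     return buckets
-- ===== SOURCE B (Python) =====
-- def bucket_by_size(vectors, size_step=5):
--     """按 (H, W) 分桶统计"""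
--     key = lambda v: ((v[4] - 1) // size_step * size_step + 1,
--                      (v[5] - 1) // size_step * size_step + 1)
--     keyed = [(key(v), v) for v in vectors]
--     keys = list(dict.fromkeys(k for k, _ in keyed))
--     return {k: [v for kk, v in keyed if kk == k] for k in keys}
-- ===== Notes on version B (the rewrite author's own statement) =====
-- stated objective: alternative
-- what changed: Replaces the single-pass hash-append loop by a key-then-group decomposition: precompute (key, vector) pairs, take the first-occurrence-ordered distinct keys, and build each bucket by filtering the keyed list, instead of mutating a dict of lists in one pass.
import Mathlib
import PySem

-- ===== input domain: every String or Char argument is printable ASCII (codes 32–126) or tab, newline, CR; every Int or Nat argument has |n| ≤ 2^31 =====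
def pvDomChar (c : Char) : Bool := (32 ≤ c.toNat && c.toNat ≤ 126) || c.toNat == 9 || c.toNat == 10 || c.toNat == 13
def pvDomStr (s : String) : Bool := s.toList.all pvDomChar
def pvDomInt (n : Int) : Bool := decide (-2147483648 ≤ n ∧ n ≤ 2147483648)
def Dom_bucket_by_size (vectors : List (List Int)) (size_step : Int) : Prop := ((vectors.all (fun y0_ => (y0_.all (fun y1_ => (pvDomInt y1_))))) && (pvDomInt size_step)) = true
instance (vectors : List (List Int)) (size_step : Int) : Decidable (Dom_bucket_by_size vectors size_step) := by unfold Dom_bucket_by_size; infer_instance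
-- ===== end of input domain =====

-- B replaces A's single-pass hash-append loop by a key/dedup/filter grouping decomposition (alternative, not faster).


-- ===== PORT A =====
def bucket_by_size (vectors : List (List Int)) (size_step : Int) : List (Int × Int × List (List Int)) :=
  let buckets := vectors.foldl (fun d v =>
      let h_bin := PySem.Int.floordiv (PySem.List.pyGetD v 4 0 - 1) size_step * size_step + 1
      let w_bin := PySem.Int.floordiv (PySem.List.pyGetD v 5 0 - 1) size_step * size_step + 1
      let key := (h_bin, w_bin)
      let d1 := if d.contains key then d else d.insert key ([] : List (List Int))
      d1.modify key [] (fun l => l ++ [v]))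
    PySem.Dict.empty
  buckets.items.map (fun p => (p.1.1, p.1.2, p.2))

-- ===== PORT B =====
-- B's 'key' lambda
def pvKey (size_step : Int) (v : List Int) : Int × Int :=
  (PySem.Int.floordiv (PySem.List.pyGetD v 4 0 - 1) size_step * size_step + 1,
   PySem.Int.floordiv (PySem.List.pyGetD v 5 0 - 1) size_step * size_step + 1)

def bucket_by_size_alt (vectors : List (List Int)) (size_step : Int) : List (Int × Int × List (List Int)) :=
  let keyed := vectors.map (fun v => (pvKey size_step v, v))
  let keys := PySem.List.dedup (keyed.map (fun p => p.1))
  keys.map (fun k => (k.1, k.2, (keyed.filter (fun p => p.1 == k)).map (fun p => p.2)))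

-- ===== PRECONDITION & SPEC =====
-- Pre_ excludes exactly the inputs on which the Python A raises: size_step = 0 with a nonempty
-- vectors list (ZeroDivisionError) and vectors with fewer than 6 entries (IndexError on v[4] / v[5]).
def Pre_bucket_by_size (vectors : List (List Int)) (size_step : Int) : Prop :=
  (vectors = [] ∨ size_step ≠ 0) ∧ ∀ v ∈ vectors, 6 ≤ v.length
instance (vectors : List (List Int)) (size_step : Int) : Decidable (Pre_bucket_by_size vectors size_step) := by unfold Pre_bucket_by_size; infer_instance

def pvWitness_bucket_by_size : List (List Int) × Int := ([[0,0,0,0,3,7], [1,1,1,1,4,9]], 5)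

def Spec_bucket_by_size (vectors : List (List Int)) (size_step : Int) (out : List (Int × Int × List (List Int))) : Prop := out = bucket_by_size_alt vectors size_step
instance (vectors : List (List Int)) (size_step : Int) (out : List (Int × Int × List (List Int))) : Decidable (Spec_bucket_by_size vectors size_step out) := by unfold Spec_bucket_by_size; infer_instance

-- ===== CLAIM (what is proved, stated in full; the proofs are below) =====
def Claim_equal_bucket_by_size : Prop := ∀ (vectors : List (List Int)) (size_step : Int), Dom_bucket_by_size vectors size_step → Pre_bucket_by_size vectors size_step → Spec_bucket_by_size vectors size_step (bucket_by_size vectors size_step)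

-- ===== LEMMAS AND PROOFS =====

-- A's "if key not in buckets: buckets[key] = []" followed by the append is one 'modify key [] (· ++ [v])'.
theorem pvStepA (d : PySem.Dict (Int × Int) (List (List Int))) (k : Int × Int) (v : List Int) :
    (if d.contains k then d else d.insert k ([] : List (List Int))).modify k [] (fun l => l ++ [v])
      = d.modify k [] (fun l => l ++ [v]) := by
  by_cases h : d.contains k
  · simp [h]
  · rw [if_neg h, PySem.Dict.modify, PySem.Dict.modify,
      PySem.Dict.getD_insert_self, PySem.Dict.insert_insert_self,
      PySem.Dict.getD_of_not_contains d [] (Bool.of_not_eq_true h)]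

-- A's loop over vectors is the keyed-pair modify-append loop over B's keyed list.
theorem pvFoldA_eq (vectors : List (List Int)) (size_step : Int) :
    vectors.foldl (fun d v =>
      let h_bin := PySem.Int.floordiv (PySem.List.pyGetD v 4 0 - 1) size_step * size_step + 1
      let w_bin := PySem.Int.floordiv (PySem.List.pyGetD v 5 0 - 1) size_step * size_step + 1
      let key := (h_bin, w_bin)
      let d1 := if d.contains key then d else d.insert key ([] : List (List Int))
      d1.modify key [] (fun l => l ++ [v])) PySem.Dict.empty
    = (vectors.map (fun v => (pvKey size_step v, v))).foldl
        (fun d p => d.modify p.1 [] (fun l => l ++ [p.2])) PySem.Dict.empty := by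
  rw [List.foldl_map]
  apply PySem.List.foldl_congr_mem
  intro acc x _
  exact pvStepA acc (pvKey size_step x) x

theorem pv_main (vectors : List (List Int)) (size_step : Int) :
    bucket_by_size vectors size_step = bucket_by_size_alt vectors size_step := by
  show (vectors.foldl (fun d v =>
      let h_bin := PySem.Int.floordiv (PySem.List.pyGetD v 4 0 - 1) size_step * size_step + 1
      let w_bin := PySem.Int.floordiv (PySem.List.pyGetD v 5 0 - 1) size_step * size_step + 1
      let key := (h_bin, w_bin)
      let d1 := if d.contains key then d else d.insert key ([] : List (List Int))
      d1.modify key [] (fun l => l ++ [v])) PySem.Dict.empty).items.map (fun p => (p.1.1, p.1.2, p.2))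
    = (PySem.List.dedup (((vectors.map (fun v => (pvKey size_step v, v))).map (fun p => p.1)))).map
        (fun k => (k.1, k.2, ((vectors.map (fun v => (pvKey size_step v, v))).filter
          (fun p => p.1 == k)).map (fun p => p.2)))
  rw [pvFoldA_eq]
  set keyed := vectors.map (fun v => (pvKey size_step v, v)) with hkeyed
  have hnd : (keyed.foldl (fun d p => d.modify p.1 [] (fun l => l ++ [p.2]))
      (PySem.Dict.empty : PySem.Dict (Int × Int) (List (List Int)))).keys.Nodup :=
    PySem.Dict.nodup_keys_foldl_modify_key _ _ _ _ _ (by simp)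
  rw [PySem.Dict.items_eq_map_keys _ hnd [], PySem.Dict.keys_foldl_modify_key, List.map_map]
  have hkeys : PySem.Set.update (PySem.Dict.empty :
      PySem.Dict (Int × Int) (List (List Int))).keys (keyed.map (fun p => p.1))
      = PySem.List.dedup (keyed.map (fun p => p.1)) := by
    simp [PySem.Set.update, PySem.Set.ofList, PySem.Dict.keys_empty]
  rw [hkeys]
  apply List.map_congr_left
  intro k _
  have hget : (keyed.foldl (fun d p => d.modify p.1 [] (fun l => l ++ [p.2]))
      (PySem.Dict.empty : PySem.Dict (Int × Int) (List (List Int)))).getD k []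
      = (keyed.filter (fun p => p.1 == k)).map (fun p => p.2) := by
    simpa using PySem.Dict.getD_foldl_modify_append keyed PySem.Dict.empty k
  simp [hget]

-- ===== VERDICT (by name: the statement is the Claim_ definition above) =====
theorem bucket_by_size_spec : Claim_equal_bucket_by_size := by
  intro vectors size_step _ _
  exact pv_main vectors size_step
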